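-- pv_equiv track=rewrite | github.com/ariuk44/retake_exam_prep | day_3.py | checkConcatenatedSum
-- ===== SOURCE A (Python) =====
-- def checkConcatenatedSum(n, catlen):
--     origin = n
--     digit_sum = 0
--     while n > 0:
--         digit = n % 10
--         rev_sum = 0
--         i = 1
--         while i <= catlen:
--             rev_sum = rev_sum * 10 + digit
--             i += 1
--         digit_sum += rev_sum
--         n //= 10
--     return 1 if origin == digit_sum else 0
-- ===== SOURCE B (Python) =====
-- def checkConcatenatedSum(n, catlen):
--     s = 0
--     m = n
--     while m > 0:
--         s += m % 10
--         m //= 10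
--     if s == 0:
--         return 1 if n == 0 else 0
--     rep = (10 ** catlen - 1) // 9 if catlen > 0 else 0
--     return 1 if n == rep * s else 0
-- ===== Notes on version B (the rewrite author's own statement) =====
-- stated objective: faster
-- what changed: Replaces the nested per-digit repetition loop by one loop summing plain digits, then a single multiplication by the repunit (10**catlen-1)//9 (computed once, and only when the digit sum is nonzero).
import Mathlib
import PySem

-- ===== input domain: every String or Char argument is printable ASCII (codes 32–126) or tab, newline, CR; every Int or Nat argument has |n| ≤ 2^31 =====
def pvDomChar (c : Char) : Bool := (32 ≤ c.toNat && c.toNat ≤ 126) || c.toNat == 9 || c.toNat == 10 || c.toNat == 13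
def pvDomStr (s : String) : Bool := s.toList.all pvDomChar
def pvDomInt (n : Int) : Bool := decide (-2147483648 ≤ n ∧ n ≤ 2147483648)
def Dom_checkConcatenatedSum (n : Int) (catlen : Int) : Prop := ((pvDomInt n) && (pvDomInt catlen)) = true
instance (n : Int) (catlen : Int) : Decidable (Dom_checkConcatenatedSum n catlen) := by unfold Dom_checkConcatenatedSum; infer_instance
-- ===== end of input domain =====

-- B replaces A's nested per-digit repetition loop by one repunit computed once,
-- multiplied by a plain digit sum gathered in a single loop (simpler, same results).


-- ===== PORT A =====
-- inner 'while i <= catlen' loop of A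
def pvInnerA (digit : Int) (rev_sum : Int) (i : Int) (catlen : Int) : Int :=
  if i ≤ catlen then pvInnerA digit (rev_sum * 10 + digit) (i + 1) catlen else rev_sum
termination_by (catlen + 1 - i).toNat
decreasing_by omega

-- outer 'while n > 0' loop of A, carrying digit_sum
def pvLoopA (n : Int) (catlen : Int) (digit_sum : Int) : Int :=
  if n > 0 then
    pvLoopA (PySem.Int.floordiv n 10) catlen (digit_sum + pvInnerA (PySem.Int.mod n 10) 0 1 catlen)
  else digit_sum
termination_by n.toNat
decreasing_by
  have h : PySem.Int.floordiv n 10 = n / 10 := PySem.Int.floordiv_eq_ediv_of_pos (by omega)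
  rw [h]; omega

def checkConcatenatedSum (n : Int) (catlen : Int) : Int :=
  if n = pvLoopA n catlen 0 then 1 else 0

-- ===== PORT B =====
-- B's 'while m > 0' digit-sum loop
def pvSumDigitsB (m : Int) (s : Int) : Int :=
  if m > 0 then pvSumDigitsB (PySem.Int.floordiv m 10) (s + PySem.Int.mod m 10) else s
termination_by m.toNat
decreasing_by
  have h : PySem.Int.floordiv m 10 = m / 10 := PySem.Int.floordiv_eq_ediv_of_pos (by omega)
  rw [h]; omega

def checkConcatenatedSum_alt (n : Int) (catlen : Int) : Int :=
  let s := pvSumDigitsB n 0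
  if s = 0 then (if n = 0 then 1 else 0)
  else
    -- 10 ** catlen with catlen > 0 is ported as 10 ^ catlen.toNat (exact for catlen > 0)
    let rep : Int := if catlen > 0 then PySem.Int.floordiv (10 ^ catlen.toNat - 1) 9 else 0
    if n = rep * s then 1 else 0

-- ===== PRECONDITION & SPEC =====
def Spec_checkConcatenatedSum (n : Int) (catlen : Int) (out : Int) : Prop := out = checkConcatenatedSum_alt n catlen
instance (n : Int) (catlen : Int) (out : Int) : Decidable (Spec_checkConcatenatedSum n catlen out) := by unfold Spec_checkConcatenatedSum; infer_instance

-- ===== CLAIM (what is proved, stated in full; the proofs are below) =====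
def Claim_equal_checkConcatenatedSum : Prop := ∀ (n : Int) (catlen : Int), Dom_checkConcatenatedSum n catlen → Spec_checkConcatenatedSum n catlen (checkConcatenatedSum n catlen)

-- ===== LEMMAS AND PROOFS =====

-- repunit with k ones, as an Int
def pvRepu : Nat → Int
  | 0 => 0
  | k + 1 => pvRepu k * 10 + 1

theorem pvRepu_succ' (k : Nat) : pvRepu (k + 1) = 10 ^ k + pvRepu k := by
  induction k with
  | zero => simp [pvRepu]
  | succ k ih =>
    show pvRepu (k + 1) * 10 + 1 = 10 ^ (k + 1) + (pvRepu k * 10 + 1)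
    rw [ih, pow_succ]; ring

theorem nine_mul_pvRepu (k : Nat) : 9 * pvRepu k = 10 ^ k - 1 := by
  induction k with
  | zero => simp [pvRepu]
  | succ k ih =>
    show 9 * (pvRepu k * 10 + 1) = 10 ^ (k + 1) - 1
    rw [pow_succ]; linarith

theorem pvInnerA_eq (d rev i catlen : Int) :
    pvInnerA d rev i catlen =
      rev * 10 ^ (catlen + 1 - i).toNat + d * pvRepu (catlen + 1 - i).toNat := by
  generalize hk : (catlen + 1 - i).toNat = k
  induction k generalizing rev i with
  | zero =>
    rw [pvInnerA]; rw [if_neg (by omega)]; simp [pvRepu]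
  | succ k ih =>
    rw [pvInnerA, if_pos (by omega)]
    rw [ih (rev * 10 + d) (i + 1) (by omega)]
    rw [pvRepu_succ', pow_succ]
    ring

theorem pvSumDigitsB_acc (m : Int) (s : Int) : pvSumDigitsB m s = s + pvSumDigitsB m 0 := by
  generalize hk : m.toNat = k
  induction k using Nat.strong_induction_on generalizing m s with
  | _ k ih =>
    rw [pvSumDigitsB]
    conv_rhs => rw [pvSumDigitsB]
    by_cases h : m > 0
    · rw [if_pos h, if_pos h]
      have hf : PySem.Int.floordiv m 10 = m / 10 := PySem.Int.floordiv_eq_ediv_of_pos (by omega)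
      rw [hf]
      rw [ih (m / 10).toNat (by omega) (m / 10) (s + PySem.Int.mod m 10) rfl,
          ih (m / 10).toNat (by omega) (m / 10) (0 + PySem.Int.mod m 10) rfl]
      ring
    · rw [if_neg h, if_neg h]; ring

theorem pvLoopA_eq (n catlen ds : Int) :
    pvLoopA n catlen ds = ds + pvRepu catlen.toNat * pvSumDigitsB n 0 := by
  generalize hk : n.toNat = k
  induction k using Nat.strong_induction_on generalizing n ds with
  | _ k ih =>
    rw [pvLoopA, pvSumDigitsB]
    by_cases h : n > 0
    · rw [if_pos h, if_pos h]
      have hf : PySem.Int.floordiv n 10 = n / 10 := PySem.Int.floordiv_eq_ediv_of_pos (by omega)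
      rw [hf] at *
      rw [ih (n / 10).toNat (by omega) (n / 10) _ rfl]
      rw [pvInnerA_eq]
      have : (catlen + 1 - 1).toNat = catlen.toNat := by omega
      rw [this]
      have hacc := pvSumDigitsB_acc (n / 10) (0 + PySem.Int.mod n 10)
      rw [hacc]
      ring
    · rw [if_neg h, if_neg h]; simp

theorem pvRep_eq (catlen : Int) :
    (if catlen > 0 then PySem.Int.floordiv (10 ^ catlen.toNat - 1) 9 else 0)
      = pvRepu catlen.toNat := by
  by_cases h : catlen > 0
  · rw [if_pos h, ← nine_mul_pvRepu,
        PySem.Int.floordiv_eq_ediv_of_pos (by norm_num),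
        Int.mul_ediv_cancel_left _ (by norm_num)]
  · rw [if_neg h]
    have : catlen.toNat = 0 := by omega
    rw [this]; rfl

-- ===== VERDICT (by name: the statement is the Claim_ definition above) =====
theorem checkConcatenatedSum_spec : Claim_equal_checkConcatenatedSum := by
  intro n catlen _
  unfold Spec_checkConcatenatedSum checkConcatenatedSum checkConcatenatedSum_alt
  rw [pvLoopA_eq]
  by_cases hs : pvSumDigitsB n 0 = 0
  · simp [hs]
  · simp only [hs, pvRep_eq]
    simp
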